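-- pv_equiv track=rewrite | github.com/AngelaHairong/Data-Mining-GSP | GSPEneroModificado(Malo).py | gsp_algorithm_with_MGen
-- ===== SOURCE A (Python) =====
-- from itertools import combinations, product
--
-- def MGen(frequent_sequences, length):
--     candidates = set()
--     for seq in frequent_sequences:
--         if len(seq) == length:
--             for additional_seq in frequent_sequences:
--                 if len(additional_seq) == 1:
--                     new_candidate = seq.union(additional_seq)
--                     if len(new_candidate) == length + 1:
--                         candidates.add(new_candidate)
--     return candidates
--
-- def is_within_max_gap(sequence, candidate, max_gap):
--     indices = [i for item in candidate for i, seq_item in enumerate(sequence) if item == seq_item]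
--     for combination in combinations(indices, len(candidate)):
--         if max(combination) - min(combination) <= max_gap:
--             return True
--     return False
--
-- def count_support_with_gap(sequences, candidates, max_gap):
--     support_counts = {candidate: 0 for candidate in candidates}
--     for sequence in sequences:
--         for candidate in candidates:
--             if candidate.issubset(sequence) and is_within_max_gap(sequence, candidate, max_gap):
--                 support_counts[candidate] += 1
--     return support_counts
--
-- def gsp_algorithm_with_MGen(sequences, min_support, max_gap, max_length):
--     length = 1
--     frequent_sequences = set()
--     current_frequent_items = {frozenset([item]) for sequence in sequences for item in sequence}
--
--     while length <= max_length:
--         length += 1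
--         candidates = MGen(current_frequent_items, length - 1)
--         support_counts = count_support_with_gap(sequences, candidates, max_gap)
--         current_frequent = {candidate for candidate, count in support_counts.items() if count >= min_support}
--
--         if not current_frequent:
--             break
--
--         frequent_sequences.update(current_frequent)
--         current_frequent_items = current_frequent
--
--     return frequent_sequences
-- ===== SOURCE B (Python) =====
-- def _adjacent_gap_ok(seq, a, b, max_gap):
--     # min spread over any 2 matching positions = min adjacent difference
--     prev = None
--     for i, x in enumerate(seq):
--         if x == a or x == b:
--             if prev is not None and i - prev <= max_gap:
--                 return True
--             prev = i
--     return False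
--
--
-- def gsp_algorithm_with_MGen(sequences, min_support, max_gap, max_length):
--     # A's candidate-growing loop can never extend past length 2 (MGen needs a
--     # length-1 member of the current level), so the result is exactly the
--     # frequent pairs; compute them directly with a linear adjacent-gap scan.
--     if max_length < 1:
--         return set()
--     items = list(dict.fromkeys(x for seq in sequences for x in seq))
--     result = set()
--     for i in range(len(items)):
--         for j in range(i + 1, len(items)):
--             a, b = items[i], items[j]
--             count = sum(1 for seq in sequences
--                         if a in seq and b in seq
--                         and _adjacent_gap_ok(seq, a, b, max_gap))
--             if count >= min_support:
--                 result.add(frozenset((a, b)))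
--     return result
-- ===== Notes on version B (the rewrite author's own statement) =====
-- stated objective: faster
-- what changed: A's GSP candidate-growing loop can never extend past size-2 itemsets (MGen needs a size-1 member of the current level), so B drops the loop and counts frequent pairs directly, replacing A's exponential combinations(indices, k) max-gap search by a single linear scan over the sequence keeping the previous matching position.
import Mathlib
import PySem

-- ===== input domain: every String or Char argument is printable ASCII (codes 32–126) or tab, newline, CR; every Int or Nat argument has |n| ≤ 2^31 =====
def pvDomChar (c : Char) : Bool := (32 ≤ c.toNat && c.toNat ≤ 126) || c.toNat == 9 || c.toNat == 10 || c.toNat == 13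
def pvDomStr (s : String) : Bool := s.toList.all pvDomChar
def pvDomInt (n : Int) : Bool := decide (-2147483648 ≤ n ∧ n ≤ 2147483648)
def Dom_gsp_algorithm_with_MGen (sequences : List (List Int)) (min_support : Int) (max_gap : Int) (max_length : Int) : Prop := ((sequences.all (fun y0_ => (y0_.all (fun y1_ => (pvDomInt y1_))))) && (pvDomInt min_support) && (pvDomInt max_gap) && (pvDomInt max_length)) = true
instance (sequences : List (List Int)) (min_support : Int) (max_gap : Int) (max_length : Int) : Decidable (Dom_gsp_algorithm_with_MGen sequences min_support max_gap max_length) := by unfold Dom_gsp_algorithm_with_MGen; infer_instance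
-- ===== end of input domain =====

-- B replaces A's candidate-growing GSP loop (which can never pass length 2) by a direct
-- frequent-pair count with a linear adjacent-gap scan instead of A's combinations search.
-- Python frozensets of ints are represented as strictly increasing lists; Python sets of
-- frozensets as PySem.Set (List Int) in first-insertion order.

-- ===== PORT A =====
-- frozenset union, on the sorted-distinct-list representation of frozenset[int]
def pyFsInsert (x : Int) : List Int → List Int
  | [] => [x]
  | y :: t => if x < y then x :: y :: t else if x = y then y :: t else y :: pyFsInsert x t

def pyFsUnion (a b : List Int) : List Int := b.foldl (fun acc x => pyFsInsert x acc) a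

-- MGen(frequent_sequences, length)
def pyA_MGen (freq : List (List Int)) (length : Int) : List (List Int) :=
  freq.foldl (fun cands sq =>
    if (sq.length : Int) = length then
      freq.foldl (fun cands ad =>
        if (ad.length : Int) = 1 then
          let nc := pyFsUnion sq ad
          if (nc.length : Int) = length + 1 then PySem.Set.add cands nc else cands
        else cands) cands
    else cands) []

-- is_within_max_gap(sequence, candidate, max_gap); max()/min() default 0 is only for the
-- empty combination (candidate length 0), which no call site reaches
def pyA_withinGap (sequence candidate : List Int) (max_gap : Int) : Bool :=
  let indices : List Int := candidate.flatMap (fun item =>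
    (PySem.List.enumerate sequence 0).filterMap (fun p => if p.2 = item then some p.1 else none))
  (PySem.List.combinations indices candidate.length).any (fun c =>
    ((PySem.List.max? c (fun x => x)).getD 0) - ((PySem.List.min? c (fun x => x)).getD 0) ≤ max_gap)

-- count_support_with_gap(sequences, candidates, max_gap)
def pyA_countSupport (sequences cands : List (List Int)) (max_gap : Int) :
    PySem.Dict (List Int) Int :=
  let d0 := cands.foldl (fun d c => PySem.Dict.insert d c 0) PySem.Dict.empty
  sequences.foldl (fun d sq =>
    cands.foldl (fun d c =>
      if c.all (fun x => sq.contains x) && pyA_withinGap sq c max_gap then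
        PySem.Dict.modify d c 0 (· + 1)
      else d) d) d0

-- the while loop; fuel = number of remaining iterations (length ≤ max_length test)
def pyA_loop (sequences : List (List Int)) (min_support max_gap : Int) :
    Nat → Int → List (List Int) → List (List Int) → List (List Int)
  | 0, _, freqs, _ => freqs
  | fuel + 1, length, freqs, cur =>
    let length' := length + 1
    let cands := pyA_MGen cur (length' - 1)
    let sc := pyA_countSupport sequences cands max_gap
    let curFreq := (sc.items.filter (fun p => min_support ≤ p.2)).map (fun p => p.1)
    if curFreq.isEmpty then freqs
    else pyA_loop sequences min_support max_gap fuel length'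
      (PySem.Set.update freqs curFreq) curFreq

def gsp_algorithm_with_MGen (sequences : List (List Int)) (min_support : Int) (max_gap : Int) (max_length : Int) : List (List Int) :=
  let singles := sequences.foldl (fun acc sq =>
    sq.foldl (fun acc item => PySem.Set.add acc [item]) acc) []
  pyA_loop sequences min_support max_gap max_length.toNat 1 [] singles

-- ===== PORT B =====
-- _adjacent_gap_ok: linear scan keeping the previous matching position
def altGapGo (a b max_gap : Int) : List (Int × Int) → Option Int → Bool
  | [], _ => false
  | p :: rest, prev =>
    if p.2 = a ∨ p.2 = b then
      match prev with
      | some q => if p.1 - q ≤ max_gap then true else altGapGo a b max_gap rest (some p.1)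
      | none => altGapGo a b max_gap rest (some p.1)
    else altGapGo a b max_gap rest prev

def altGapOk (sq : List Int) (a b max_gap : Int) : Bool :=
  altGapGo a b max_gap (PySem.List.enumerate sq 0) none

def altCount (sequences : List (List Int)) (a b max_gap : Int) : Int :=
  (sequences.map (fun sq =>
    if sq.contains a && sq.contains b && altGapOk sq a b max_gap then (1 : Int) else 0)).sum

-- the inner 'for j in range(i+1, …)' loop: b runs over the items after a
def altInner (sequences : List (List Int)) (min_support max_gap a : Int) :
    List Int → List (List Int) → List (List Int)
  | [], res => res
  | b :: rest, res =>
    altInner sequences min_support max_gap a rest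
      (if min_support ≤ altCount sequences a b max_gap then
        PySem.Set.add res (if a ≤ b then [a, b] else [b, a])
      else res)

-- the outer 'for i in range(…)' loop
def altOuter (sequences : List (List Int)) (min_support max_gap : Int) :
    List Int → List (List Int) → List (List Int)
  | [], res => res
  | a :: rest, res =>
    altOuter sequences min_support max_gap rest
      (altInner sequences min_support max_gap a rest res)

def gsp_algorithm_with_MGen_alt (sequences : List (List Int)) (min_support : Int) (max_gap : Int) (max_length : Int) : List (List Int) :=
  if max_length < 1 then []
  else altOuter sequences min_support max_gap
    (PySem.List.dedup (sequences.flatMap (fun sq => sq))) []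

-- ===== PRECONDITION & SPEC =====
def Spec_gsp_algorithm_with_MGen (sequences : List (List Int)) (min_support : Int) (max_gap : Int) (max_length : Int) (out : List (List Int)) : Prop := out = gsp_algorithm_with_MGen_alt sequences min_support max_gap max_length
instance (sequences : List (List Int)) (min_support : Int) (max_gap : Int) (max_length : Int) (out : List (List Int)) : Decidable (Spec_gsp_algorithm_with_MGen sequences min_support max_gap max_length out) := by unfold Spec_gsp_algorithm_with_MGen; infer_instance

-- ===== CLAIM (what is proved, stated in full; the proofs are below) =====
def Claim_equal_gsp_algorithm_with_MGen : Prop := ∀ (sequences : List (List Int)) (min_support : Int) (max_gap : Int) (max_length : Int), Dom_gsp_algorithm_with_MGen sequences min_support max_gap max_length → Spec_gsp_algorithm_with_MGen sequences min_support max_gap max_length (gsp_algorithm_with_MGen sequences min_support max_gap max_length)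

-- ===== LEMMAS AND PROOFS =====
-- proof helpers
def canon (a b : Int) : List Int := if a ≤ b then [a, b] else [b, a]

def tri : List Int → List (List Int)
  | [] => []
  | a :: r => r.map (canon a) ++ tri r

def triPre : List Int → List Int → List (List Int)
  | [], _ => []
  | a :: d, todo => (d ++ todo).map (canon a) ++ triPre d todo

theorem canon_eq_pair (a b : Int) : canon a b = [min a b, max a b] := by
  unfold canon
  by_cases h : a ≤ b
  · simp only [if_pos h, min_def, max_def]
  · simp only [if_neg h, min_def, max_def]

theorem canon_comm (a b : Int) : canon a b = canon b a := by
  rw [canon_eq_pair, canon_eq_pair, min_comm, max_comm]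

theorem canon_length (a b : Int) : (canon a b).length = 2 := by
  rw [canon_eq_pair]; rfl

theorem canon_inj_iff (a b c d : Int) :
    canon a b = canon c d ↔ (min a b = min c d ∧ max a b = max c d) := by
  rw [canon_eq_pair, canon_eq_pair]; simp

theorem canon_eq_elim {a b c d : Int} (h : canon a b = canon c d) :
    (a = c ∧ b = d) ∨ (a = d ∧ b = c) := by
  rw [canon_inj_iff] at h
  rcases le_total a b with h1 | h1 <;> rcases le_total c d with h2 | h2 <;>
    simp only [min_def, max_def, if_pos h1, if_pos h2] at h <;> omega

theorem canon_inj_right {a b c : Int} (h : canon a b = canon a c) : b = c := by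
  rcases canon_eq_elim h with ⟨_, h2⟩ | ⟨h1, h2⟩ <;> omega

theorem nodup_map_canon {a : Int} {l : List Int} (h : l.Nodup) :
    (l.map (canon a)).Nodup := by
  exact List.Nodup.map_on (fun x _ y _ hxy => canon_inj_right hxy) h

theorem triPre_nil (l : List Int) : triPre l [] = tri l := by
  induction l with
  | nil => rfl
  | cons a d ih => simp [triPre, tri, ih]

theorem triPre_snoc (done : List Int) (s : Int) (rest : List Int) :
    triPre (done ++ [s]) rest = triPre done (s :: rest) ++ rest.map (canon s) := by
  induction done with
  | nil => simp [triPre]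
  | cons a d ih => simp [triPre, ih]

theorem mem_triPre {done todo : List Int} {s t : Int} (ht : t ∈ done) (hs : s ∈ todo) :
    canon s t ∈ triPre done todo := by
  induction done with
  | nil => cases ht
  | cons a d ih =>
    rcases List.mem_cons.mp ht with rfl | h
    · exact List.mem_append_left _ (by
        rw [canon_comm]
        exact List.mem_map_of_mem (List.mem_append_right _ hs))
    · exact List.mem_append_right _ (ih h)

theorem mem_triPre_elim {done todo : List Int} {x : List Int} (hx : x ∈ triPre done todo) :
    ∃ a u, a ∈ done ∧ x = canon a u := by
  induction done with
  | nil => cases hx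
  | cons a d ih =>
    rcases List.mem_append.mp hx with h | h
    · obtain ⟨u, _, rfl⟩ := List.mem_map.mp h
      exact ⟨a, u, List.mem_cons_self, rfl⟩
    · obtain ⟨a', u, ha, rfl⟩ := ih h
      exact ⟨a', u, List.mem_cons_of_mem _ ha, rfl⟩

theorem fresh_triPre {done : List Int} {s : Int} {rest : List Int} {t : Int}
    (hnd : (done ++ s :: rest).Nodup) (ht : t ∈ rest) :
    canon s t ∉ triPre done (s :: rest) := by
  intro hmem
  obtain ⟨a, u, ha, he⟩ := mem_triPre_elim hmem
  have hdis := (List.nodup_append.mp hnd).2.2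
  rcases canon_eq_elim he with ⟨rfl, rfl⟩ | ⟨rfl, rfl⟩
  · exact hdis s ha s List.mem_cons_self rfl
  · exact hdis t ha t (List.mem_cons_of_mem _ ht) rfl

theorem foldl_id_of {α β : Type} (l : List α) (f : β → α → β) (acc : β)
    (h : ∀ t ∈ l, f acc t = acc) : l.foldl f acc = acc := by
  induction l with
  | nil => rfl
  | cons x xs ih =>
    rw [List.foldl_cons, h x List.mem_cons_self]
    exact ih (fun t ht => h t (List.mem_cons_of_mem _ ht))

theorem foldl_add_fresh (s : Int) (l : List Int) (acc : List (List Int))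
    (hne : ∀ t ∈ l, s ≠ t) (hfresh : ∀ t ∈ l, canon s t ∉ acc)
    (hnd : (l.map (canon s)).Nodup) :
    l.foldl (fun c t => if s = t then c else PySem.Set.add c (canon s t)) acc
      = acc ++ l.map (canon s) := by
  induction l generalizing acc with
  | nil => simp
  | cons t ts ih =>
    rw [List.foldl_cons, if_neg (hne t List.mem_cons_self),
      PySem.Set.add_of_not_mem (hfresh t List.mem_cons_self)]
    rw [ih (acc ++ [canon s t])
      (fun u hu => hne u (List.mem_cons_of_mem _ hu))
      (fun u hu => by
        intro hmem
        rcases List.mem_append.mp hmem with h | h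
        · exact hfresh u (List.mem_cons_of_mem _ hu) h
        · have : canon s u = canon s t := List.mem_singleton.mp h
          have : u = t := canon_inj_right this
          subst this
          exact (List.nodup_cons.mp (by simpa using hnd)).1
            (List.mem_map_of_mem hu))
      ((List.nodup_cons.mp (by simpa using hnd)).2)]
    simp

theorem innerG {done : List Int} {s : Int} {rest : List Int}
    (hnd : (done ++ s :: rest).Nodup) :
    (done ++ s :: rest).foldl
        (fun c t => if s = t then c else PySem.Set.add c (canon s t))
        (triPre done (s :: rest))
      = triPre (done ++ [s]) rest := by
  rw [List.foldl_append, List.foldl_cons, if_pos rfl]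
  have hdis := (List.nodup_append.mp hnd).2.2
  have hnds : (s :: rest).Nodup := (List.nodup_append.mp hnd).2.1
  rw [foldl_id_of done _ _ (fun t ht => by
    rw [if_neg (fun he => hdis t ht s List.mem_cons_self he.symm)]
    exact PySem.Set.add_of_mem (mem_triPre ht List.mem_cons_self))]
  rw [foldl_add_fresh s rest _
    (fun t ht he => (List.nodup_cons.mp hnds).1 (he ▸ ht))
    (fun t ht => fresh_triPre hnd ht)
    (nodup_map_canon (List.nodup_cons.mp hnds).2)]
  rw [triPre_snoc]

theorem outerG (todo : List Int) : ∀ done : List Int, (done ++ todo).Nodup →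
    todo.foldl
        (fun c s => (done ++ todo).foldl
          (fun c t => if s = t then c else PySem.Set.add c (canon s t)) c)
        (triPre done todo)
      = tri (done ++ todo) := by
  induction todo with
  | nil => intro done _; simpa using triPre_nil done
  | cons s rest ih =>
    intro done hnd
    rw [List.foldl_cons, innerG hnd]
    have hassoc : done ++ s :: rest = (done ++ [s]) ++ rest := by simp
    rw [hassoc]
    exact ih (done ++ [s]) (by rw [← hassoc]; exact hnd)

theorem mem_tri_elim {l : List Int} (hnd : l.Nodup) {x : List Int} (hx : x ∈ tri l) :
    ∃ u v, u ∈ l ∧ v ∈ l ∧ u ≠ v ∧ x = canon u v := by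
  induction l with
  | nil => cases hx
  | cons a r ih =>
    rcases List.mem_append.mp hx with h | h
    · obtain ⟨v, hv, rfl⟩ := List.mem_map.mp h
      exact ⟨a, v, List.mem_cons_self, List.mem_cons_of_mem _ hv,
        fun he => (List.nodup_cons.mp hnd).1 (he ▸ hv), rfl⟩
    · obtain ⟨u, v, hu, hv, hne, rfl⟩ := ih (List.nodup_cons.mp hnd).2 h
      exact ⟨u, v, List.mem_cons_of_mem _ hu, List.mem_cons_of_mem _ hv, hne, rfl⟩

theorem length_of_mem_tri {l : List Int} {x : List Int} (hx : x ∈ tri l) :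
    x.length = 2 := by
  induction l with
  | nil => cases hx
  | cons a r ih =>
    rcases List.mem_append.mp hx with h | h
    · obtain ⟨v, _, rfl⟩ := List.mem_map.mp h
      exact canon_length a v
    · exact ih h

theorem tri_nodup {l : List Int} (hnd : l.Nodup) : (tri l).Nodup := by
  induction l with
  | nil => exact List.nodup_nil
  | cons a r ih =>
    have hnr := (List.nodup_cons.mp hnd).2
    have hna := (List.nodup_cons.mp hnd).1
    refine List.Nodup.append (nodup_map_canon hnr) (ih hnr) ?_
    intro x hx1 hx2
    obtain ⟨v, hv, rfl⟩ := List.mem_map.mp hx1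
    obtain ⟨u, w, hu, hw, hne, he⟩ := mem_tri_elim hnr hx2
    rcases canon_eq_elim he with ⟨rfl, rfl⟩ | ⟨rfl, rfl⟩
    · exact hna hu
    · exact hna hw



def cntA (sequences : List (List Int)) (max_gap : Int) (c : List Int) : Int :=
  ((sequences.filter (fun sq =>
    c.all (fun x => sq.contains x) && pyA_withinGap sq c max_gap)).length : Int)

theorem fsUnion_single {a b : Int} (h : a ≠ b) : pyFsUnion [a] [b] = canon a b := by
  unfold pyFsUnion canon
  simp only [List.foldl_cons, List.foldl_nil, pyFsInsert]
  by_cases hlt : b < a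
  · rw [if_pos hlt, if_neg (by omega)]
  · rw [if_neg hlt, if_neg (fun he => h he.symm), if_pos (by omega)]

theorem fsUnion_single_self (a : Int) : pyFsUnion [a] [a] = [a] := by
  unfold pyFsUnion
  simp [pyFsInsert]

theorem MGen_one {items : List Int} (hnd : items.Nodup) :
    pyA_MGen (items.map (fun x => [x])) 1 = tri items := by
  unfold pyA_MGen
  rw [List.foldl_map]
  refine Eq.trans (PySem.List.foldl_congr_mem' _ _
    (fun c s => items.foldl
      (fun c t => if s = t then c else PySem.Set.add c (canon s t)) c) _ ?_) ?_
  · intro s _ c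
    dsimp only
    rw [if_pos (by norm_num), List.foldl_map]
    refine PySem.List.foldl_congr_mem' _ _
      (fun c t => if s = t then c else PySem.Set.add c (canon s t)) _ ?_
    intro t _ c
    dsimp only
    rw [if_pos (by norm_num)]
    by_cases he : s = t
    · subst he
      simp [fsUnion_single_self]
    · simp [fsUnion_single he, canon_length, he]
  · simpa [triPre] using outerG items [] (by simpa using hnd)

theorem keys_update_of_subset {s : PySem.Set (List Int)} {xs : List (List Int)}
    (h : ∀ x ∈ xs, x ∈ s) : PySem.Set.update s xs = s := by
  rw [PySem.Set.update_eq_append_filter]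
  have hnil : (PySem.Set.ofList xs).filter (fun y => !(PySem.Set.contains s y)) = [] := by
    rw [List.filter_eq_nil_iff]
    intro y hy
    have hys : y ∈ s := h y (by simpa [pysem] using hy)
    simp [pysem, hys]
  rw [hnil, List.append_nil]

theorem countSupport_d0_items (cands : List (List Int)) (hnd : cands.Nodup) :
    (cands.foldl (fun d c => PySem.Dict.insert d c 0) (PySem.Dict.empty (ν := Int))).items
      = cands.map (fun c => (c, (0 : Int))) := by
  have := PySem.Dict.items_foldl_insert_fresh cands (fun c => c) (fun _ => (0 : Int))
    PySem.Dict.empty (fun a _ => PySem.Dict.contains_empty a) (by simpa using hnd)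
  simpa using this

theorem countSupport_inner_keys (cands : List (List Int)) (sq : List Int) (mg : Int)
    (d : PySem.Dict (List Int) Int) (hk : ∀ c ∈ cands, c ∈ d.keys) :
    (cands.foldl (fun d c =>
      if c.all (fun x => sq.contains x) && pyA_withinGap sq c mg then
        PySem.Dict.modify d c 0 (· + 1)
      else d) d).keys = d.keys := by
  rw [PySem.List.foldl_if_eq_foldl_filter, PySem.Dict.keys_foldl_modify]
  exact keys_update_of_subset (fun x hx => hk x (List.mem_of_mem_filter hx))

theorem countSupport_inner_getD (cands : List (List Int)) (sq : List Int) (mg : Int)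
    (d : PySem.Dict (List Int) Int) (c : List Int) (hc : c ∈ cands) (hnd : cands.Nodup) :
    (cands.foldl (fun d c =>
      if c.all (fun x => sq.contains x) && pyA_withinGap sq c mg then
        PySem.Dict.modify d c 0 (· + 1)
      else d) d).getD c 0
      = d.getD c 0 +
        (if c.all (fun x => sq.contains x) && pyA_withinGap sq c mg then (1 : Int) else 0) := by
  rw [PySem.List.foldl_if_eq_foldl_filter, PySem.Dict.getD_foldl_modify_add_one]
  by_cases hp : (c.all (fun x => sq.contains x) && pyA_withinGap sq c mg) = true
  · rw [List.count_filter (p := fun c => (c.all (fun x => sq.contains x) && pyA_withinGap sq c mg)) hp,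
      List.count_eq_one_of_mem hnd hc]
    rw [if_pos hp]
    simp
  · have hz : List.count c (List.filter
        (fun c => (c.all (fun x => sq.contains x) && pyA_withinGap sq c mg)) cands) = 0 :=
      List.count_eq_zero.mpr (fun hmem => hp (List.of_mem_filter
        (p := fun c => (c.all (fun x => sq.contains x) && pyA_withinGap sq c mg)) hmem))
    rw [hz, if_neg hp]
    simp

theorem countSupport_outer (sequences : List (List Int)) (cands : List (List Int)) (mg : Int)
    (c : List Int) (hc : c ∈ cands) (hnd : cands.Nodup) :
    ∀ d : PySem.Dict (List Int) Int, (∀ c' ∈ cands, c' ∈ d.keys) →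
    (sequences.foldl (fun d sq =>
        cands.foldl (fun d c =>
          if c.all (fun x => sq.contains x) && pyA_withinGap sq c mg then
            PySem.Dict.modify d c 0 (· + 1)
          else d) d) d).getD c 0
      = d.getD c 0 + ((sequences.filter (fun sq =>
          c.all (fun x => sq.contains x) && pyA_withinGap sq c mg)).length : Int) := by
  induction sequences with
  | nil => intro d _; simp
  | cons sq seqs ih =>
    intro d hk
    rw [List.foldl_cons]
    rw [ih _ (fun c' hc' => by
      rw [countSupport_inner_keys cands sq mg d hk]; exact hk c' hc')]
    rw [countSupport_inner_getD cands sq mg d c hc hnd]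
    by_cases hp : (c.all (fun x => sq.contains x) && pyA_withinGap sq c mg) = true
    · simp only [List.filter_cons, hp, if_true, List.length_cons, if_pos hp]
      push_cast
      ring
    · simp only [List.filter_cons, hp, if_false]
      simp [hp]

theorem countSupport_outer_keys (sequences : List (List Int)) (cands : List (List Int)) (mg : Int) :
    ∀ d : PySem.Dict (List Int) Int, (∀ c' ∈ cands, c' ∈ d.keys) →
    (sequences.foldl (fun d sq =>
        cands.foldl (fun d c =>
          if c.all (fun x => sq.contains x) && pyA_withinGap sq c mg then
            PySem.Dict.modify d c 0 (· + 1)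
          else d) d) d).keys = d.keys := by
  induction sequences with
  | nil => intro d _; rfl
  | cons sq seqs ih =>
    intro d hk
    rw [List.foldl_cons]
    have h1 := countSupport_inner_keys cands sq mg d hk
    rw [ih _ (fun c' hc' => by rw [h1]; exact hk c' hc'), h1]

theorem countSupport_items (sequences : List (List Int)) (cands : List (List Int)) (mg : Int)
    (hnd : cands.Nodup) :
    (pyA_countSupport sequences cands mg).items
      = cands.map (fun c => (c, cntA sequences mg c)) := by
  unfold pyA_countSupport
  set d0 := cands.foldl (fun d c => PySem.Dict.insert d c 0) (PySem.Dict.empty (ν := Int)) with hd0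
  have hitems0 : d0.items = cands.map (fun c => (c, (0 : Int))) :=
    countSupport_d0_items cands hnd
  have hkeys0 : d0.keys = cands := by
    rw [hd0, PySem.Dict.keys_foldl_insert, PySem.Dict.keys_empty,
      PySem.Set.update_nil_left]
    exact PySem.Set.ofList_eq_self_of_nodup _ hnd
  have hk0 : ∀ c' ∈ cands, c' ∈ d0.keys := fun c' hc' => hkeys0 ▸ hc'
  have hkeys := countSupport_outer_keys sequences cands mg d0 hk0
  rw [PySem.Dict.items_eq_map_keys _ (by rw [hkeys, hkeys0]; exact hnd) 0, hkeys, hkeys0]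
  refine List.map_congr_left (fun c hc => ?_)
  rw [countSupport_outer sequences cands mg c hc hnd d0 hk0]
  have hg0 : d0.getD c 0 = 0 :=
    PySem.Dict.getD_of_mem_items d0
      (by rw [hitems0]; exact List.mem_map_of_mem (f := fun c => (c, (0 : Int))) hc)
      (by rw [hkeys0]; exact hnd) 0
  rw [hg0]
  simp only [cntA]
  ring

theorem countSupport_curFreq (sequences : List (List Int)) (cands : List (List Int))
    (ms mg : Int) (hnd : cands.Nodup) :
    ((pyA_countSupport sequences cands mg).items.filter (fun p => ms ≤ p.2)).map
        (fun p => p.1)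
      = cands.filter (fun c => ms ≤ cntA sequences mg c) := by
  rw [countSupport_items sequences cands mg hnd, List.filter_map, List.map_map]
  simp [Function.comp_def]


-- adjacent-difference check over a list of positions
def adjChk (g : Int) : List Int → Bool
  | u :: v :: t => (decide (v - u ≤ g)) || adjChk g (v :: t)
  | _ => false

-- the matching positions of a and b, in sequence order
def matchIdx (a b : Int) (l : List (Int × Int)) : List Int :=
  (l.filter (fun p => p.2 == a || p.2 == b)).map (fun p => p.1)

theorem altGapGo_eq_adjChk (a b g : Int) :
    ∀ (l : List (Int × Int)) (prev : Option Int),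
    altGapGo a b g l prev = adjChk g (prev.toList ++ matchIdx a b l) := by
  intro l
  induction l with
  | nil =>
    intro prev
    cases prev <;> simp [altGapGo, matchIdx, adjChk]
  | cons p rest ih =>
    intro prev
    by_cases hm : p.2 = a ∨ p.2 = b
    · have hf : (p.2 == a || p.2 == b) = true := by
        rcases hm with h | h <;> simp [h]
      cases prev with
      | none =>
        simp only [altGapGo, if_pos hm, matchIdx, List.filter_cons, hf, List.map_cons]
        exact ih (some p.1)
      | some q =>
        simp only [altGapGo, if_pos hm, matchIdx, List.filter_cons, hf, List.map_cons]
        by_cases hle : p.1 - q ≤ g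
        · simp only [if_pos hle, Option.toList]
          show true = adjChk g (q :: p.1 :: matchIdx a b rest)
          unfold adjChk
          simp [hle]
        · simp only [if_neg hle, Option.toList]
          show altGapGo a b g rest (some p.1) = adjChk g (q :: p.1 :: matchIdx a b rest)
          unfold adjChk
          rw [ih (some p.1)]
          simp [hle, Option.toList, matchIdx]
    · have hf : (p.2 == a || p.2 == b) = false := by
        simp only [not_or] at hm
        simp [hm.1, hm.2]
      simp only [altGapGo, if_neg hm, matchIdx, List.filter_cons, hf]
      exact ih prev

theorem adjChk_spec (g : Int) :
    ∀ (P : List Int), P.Pairwise (· < ·) →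
    (adjChk g P = true ↔ ∃ u ∈ P, ∃ v ∈ P, u < v ∧ v - u ≤ g) := by
  intro P
  induction P with
  | nil => intro _; simp [adjChk]
  | cons u t ih =>
    intro hp
    cases t with
    | nil =>
      simp [adjChk]
    | cons v t2 =>
      have hp' : (v :: t2).Pairwise (· < ·) := hp.of_cons
      have huv : u < v := (List.pairwise_cons.mp hp).1 v List.mem_cons_self
      have hult : ∀ w ∈ v :: t2, u < w := (List.pairwise_cons.mp hp).1
      constructor
      · intro h
        rw [show adjChk g (u :: v :: t2) = (decide (v - u ≤ g) || adjChk g (v :: t2))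
          from rfl] at h
        rcases Bool.or_eq_true_iff.mp h with h1 | h1
        · exact ⟨u, List.mem_cons_self, v,
            List.mem_cons_of_mem _ List.mem_cons_self, huv, by simpa using h1⟩
        · obtain ⟨u', hu', v', hv', hlt, hle⟩ := (ih hp').mp h1
          exact ⟨u', List.mem_cons_of_mem _ hu', v', List.mem_cons_of_mem _ hv', hlt, hle⟩
      · rintro ⟨u', hu', v', hv', hlt, hle⟩
        show (decide (v - u ≤ g) || adjChk g (v :: t2)) = true
        rcases List.mem_cons.mp hu' with rfl | hu'
        · have hvv' : v ≤ v' := by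
            rcases List.mem_cons.mp hv' with rfl | hv2
            · omega
            · rcases List.mem_cons.mp hv2 with rfl | hv3
              · omega
              · exact le_of_lt ((List.pairwise_cons.mp hp').1 v' hv3)
          simp only [Bool.or_eq_true, decide_eq_true_eq]
          left; omega
        · have hv'2 : v' ∈ v :: t2 := by
            rcases List.mem_cons.mp hv' with he | hv2
            · exfalso
              have h2 := hult u' hu'
              omega
            · exact hv2
          simp only [Bool.or_eq_true]
          right
          exact (ih hp').mpr ⟨u', hu', v', hv'2, hlt, hle⟩

theorem matchIdx_pairwise (a b : Int) (sq : List Int) :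
    (matchIdx a b (PySem.List.enumerate sq 0)).Pairwise (· < ·) := by
  unfold matchIdx
  rw [List.pairwise_map]
  exact (PySem.List.pairwise_lt_enumerate sq 0).filter _

theorem filterMap_eq_of (sq : List Int) (v : Int) :
    (PySem.List.enumerate sq 0).filterMap
        (fun p => if p.2 = v then some p.1 else none)
      = ((PySem.List.enumerate sq 0).filter (fun p => p.2 == v)).map (fun p => p.1) := by
  induction PySem.List.enumerate sq 0 with
  | nil => rfl
  | cons p rest ih =>
    by_cases h : p.2 = v
    · simp [List.filterMap_cons, List.filter_cons, h, ih]
    · simp [List.filterMap_cons, List.filter_cons, h, ih]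

theorem enum_fst_pairwise (sq : List Int) (p : (Int × Int) → Bool) :
    (((PySem.List.enumerate sq 0).filter p).map (fun q => q.1)).Pairwise (· < ·) := by
  rw [List.pairwise_map]
  exact (PySem.List.pairwise_lt_enumerate sq 0).filter _

theorem enum_fst_nodup (sq : List Int) (p : (Int × Int) → Bool) :
    (((PySem.List.enumerate sq 0).filter p).map (fun q => q.1)).Nodup :=
  (enum_fst_pairwise sq p).imp ne_of_lt

theorem mem_enum_fst (sq : List Int) (p : (Int × Int) → Bool) (u : Int) :
    u ∈ ((PySem.List.enumerate sq 0).filter p).map (fun q => q.1)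
      ↔ ∃ q ∈ PySem.List.enumerate sq 0, p q = true ∧ u = q.1 := by
  simp only [List.mem_map, List.mem_filter]
  constructor
  · rintro ⟨q, ⟨hq, hp⟩, rfl⟩; exact ⟨q, hq, hp, rfl⟩
  · rintro ⟨q, hq, hp, rfl⟩; exact ⟨q, ⟨hq, hp⟩, rfl⟩

theorem enum_fst_inj (sq : List Int) {q1 q2 : Int × Int}
    (hq1 : q1 ∈ PySem.List.enumerate sq 0) (hq2 : q2 ∈ PySem.List.enumerate sq 0)
    (he : q1.1 = q2.1) : q1 = q2 := by
  rw [PySem.List.mem_enumerate_iff] at hq1 hq2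
  obtain ⟨k1, hk1, hq1e⟩ := hq1
  obtain ⟨k2, hk2, hq2e⟩ := hq2
  subst hq1e; subst hq2e
  simp only at he ⊢
  have : k1 = k2 := by omega
  subst this
  rfl

theorem pair_sublist_of_mem {α : Type} {u v : α} :
    ∀ {xs : List α}, u ∈ xs → v ∈ xs → u ≠ v →
      ([u, v].Sublist xs ∨ [v, u].Sublist xs) := by
  intro xs
  induction xs with
  | nil => intro h; cases h
  | cons x t ih =>
    intro hu hv hne
    rcases List.mem_cons.mp hu with rfl | hu'
    · have hv' : v ∈ t := by
        rcases List.mem_cons.mp hv with he | h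
        · exact absurd he.symm hne
        · exact h
      exact Or.inl (List.Sublist.cons₂ _ (List.singleton_sublist.mpr hv'))
    · rcases List.mem_cons.mp hv with rfl | hv'
      · exact Or.inr (List.Sublist.cons₂ _ (List.singleton_sublist.mpr hu'))
      · rcases ih hu' hv' hne with h | h
        · exact Or.inl (h.cons _)
        · exact Or.inr (h.cons _)

theorem withinGap_spec (sq : List Int) (a b g : Int) (hab : a ≠ b) :
    pyA_withinGap sq (canon a b) g = true ↔
      ∃ u ∈ matchIdx a b (PySem.List.enumerate sq 0),
        ∃ v ∈ matchIdx a b (PySem.List.enumerate sq 0), u < v ∧ v - u ≤ g := by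
  have hx : min a b ≠ max a b := by
    rcases le_total a b with h | h <;> simp [min_def, max_def, h] <;> omega
  unfold pyA_withinGap
  rw [canon_eq_pair]
  dsimp only
  have hflat : ([min a b, max a b] : List Int).flatMap (fun item =>
      (PySem.List.enumerate sq 0).filterMap
        (fun p => if p.2 = item then some p.1 else none))
      = ((PySem.List.enumerate sq 0).filter (fun p => p.2 == min a b)).map (fun q => q.1)
        ++ ((PySem.List.enumerate sq 0).filter (fun p => p.2 == max a b)).map
            (fun q => q.1) := by
    simp [List.flatMap_cons, filterMap_eq_of]
  rw [hflat]
  set I := ((PySem.List.enumerate sq 0).filter (fun p => p.2 == min a b)).map (fun q => q.1)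
    ++ ((PySem.List.enumerate sq 0).filter (fun p => p.2 == max a b)).map (fun q => q.1)
    with hI
  have hInodup : I.Nodup := by
    rw [hI]
    refine List.Nodup.append (enum_fst_nodup sq _) (enum_fst_nodup sq _) ?_
    intro u hu1 hu2
    obtain ⟨q1, hq1, hp1, he1⟩ := (mem_enum_fst sq _ u).mp hu1
    obtain ⟨q2, hq2, hp2, he2⟩ := (mem_enum_fst sq _ u).mp hu2
    have hq12 : q1 = q2 := enum_fst_inj sq hq1 hq2 (by omega)
    subst hq12
    exact hx (by
      have e1 : q1.2 = min a b := by simpa using hp1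
      have e2 : q1.2 = max a b := by simpa using hp2
      omega)
  have hmemI : ∀ u, u ∈ I ↔ u ∈ matchIdx a b (PySem.List.enumerate sq 0) := by
    intro u
    rw [hI]
    unfold matchIdx
    rw [List.mem_append, mem_enum_fst, mem_enum_fst, mem_enum_fst]
    constructor
    · rintro (⟨q, hq, hp, rfl⟩ | ⟨q, hq, hp, rfl⟩) <;>
        refine ⟨q, hq, ?_, rfl⟩ <;>
        · have := of_decide_eq_true (by simpa using hp)
          rcases le_total a b with h | h <;>
            simp only [min_def, max_def, if_pos h, if_neg (not_le.mpr (lt_of_le_of_ne h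
              (by omega)))] at this <;> simp [this]
    · rintro ⟨q, hq, hp, rfl⟩
      have hq2 : q.2 = a ∨ q.2 = b := by
        rcases Bool.or_eq_true_iff.mp hp with h | h
        · exact Or.inl (by simpa using h)
        · exact Or.inr (by simpa using h)
      have : q.2 = min a b ∨ q.2 = max a b := by
        rcases le_total a b with h | h <;> simp [min_def, max_def, h] <;> omega
      rcases this with h | h
      · exact Or.inl ⟨q, hq, by simp [h], rfl⟩
      · exact Or.inr ⟨q, hq, by simp [h], rfl⟩
  constructor
  · intro h
    obtain ⟨c, hc, hf⟩ := List.any_eq_true.mp h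
    obtain ⟨hsub, hlen⟩ := (PySem.List.mem_combinations_iff I 2 c).mp hc
    obtain ⟨u, v, rfl⟩ := List.length_eq_two.mp hlen
    have huv : u ≠ v := by
      have := hInodup.sublist hsub
      simp at this
      exact this
    have hu : u ∈ I := hsub.subset (by simp)
    have hv : v ∈ I := hsub.subset (by simp)
    have hle : max u v - min u v ≤ g := by
      rw [PySem.List.max?_id_cons, PySem.List.min?_id_cons] at hf
      simpa [max_def, min_def] using of_decide_eq_true hf
    rcases lt_trichotomy u v with hlt | he | hlt
    · exact ⟨u, (hmemI u).mp hu, v, (hmemI v).mp hv, hlt, by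
        rcases le_total u v with h | h <;> simp [max_def, min_def, h] at hle <;> omega⟩
    · exact absurd he huv
    · exact ⟨v, (hmemI v).mp hv, u, (hmemI u).mp hu, hlt, by
        rcases le_total u v with h | h <;> simp [max_def, min_def, h] at hle <;> omega⟩
  · rintro ⟨u, hu, v, hv, hlt, hle⟩
    have hu' : u ∈ I := (hmemI u).mpr hu
    have hv' : v ∈ I := (hmemI v).mpr hv
    rcases pair_sublist_of_mem hu' hv' (ne_of_lt hlt) with h | h
    · refine List.any_eq_true.mpr ⟨[u, v],
        (PySem.List.mem_combinations_iff I 2 [u, v]).mpr ⟨h, rfl⟩, ?_⟩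
      rw [PySem.List.max?_id_cons, PySem.List.min?_id_cons]
      simp only [List.foldl_cons, List.foldl_nil, Option.getD_some]
      exact decide_eq_true (by rcases le_total u v with h2 | h2 <;>
        simp [max_def, min_def, h2] <;> omega)
    · refine List.any_eq_true.mpr ⟨[v, u],
        (PySem.List.mem_combinations_iff I 2 [v, u]).mpr ⟨h, rfl⟩, ?_⟩
      rw [PySem.List.max?_id_cons, PySem.List.min?_id_cons]
      simp only [List.foldl_cons, List.foldl_nil, Option.getD_some]
      exact decide_eq_true (by rcases le_total u v with h2 | h2 <;>
        simp [max_def, min_def, h2] <;> omega)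

theorem gapBool_eq (sq : List Int) (a b g : Int) (hab : a ≠ b) :
    altGapOk sq a b g = pyA_withinGap sq (canon a b) g := by
  have h1 : altGapOk sq a b g = adjChk g (matchIdx a b (PySem.List.enumerate sq 0)) := by
    unfold altGapOk
    simpa using altGapGo_eq_adjChk a b g (PySem.List.enumerate sq 0) none
  rw [Bool.eq_iff_iff, h1,
    adjChk_spec g _ (matchIdx_pairwise a b sq), withinGap_spec sq a b g hab]

theorem all_canon (sq : List Int) (a b : Int) :
    ((canon a b).all (fun x => sq.contains x)) = (sq.contains a && sq.contains b) := by
  rcases le_total a b with h | h <;>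
    simp [canon_eq_pair, min_def, max_def, h, Bool.and_comm]

theorem cnt_eq (seqs : List (List Int)) (a b g : Int) (hab : a ≠ b) :
    altCount seqs a b g = cntA seqs g (canon a b) := by
  unfold altCount cntA
  rw [PySem.List.sum_map_ite_one_zero, ← List.countP_eq_length_filter]
  congr 1
  refine List.countP_congr (fun sq _ => ?_)
  rw [all_canon, gapBool_eq sq a b g hab, Bool.and_assoc]

theorem altInner_spec (seqs : List (List Int)) (ms mg a : Int) :
    ∀ (rest : List Int) (res : List (List Int)),
    (∀ t ∈ rest, a ≠ t) → (∀ t ∈ rest, canon a t ∉ res) → (rest.map (canon a)).Nodup →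
    altInner seqs ms mg a rest res
      = res ++ (rest.map (canon a)).filter (fun c => ms ≤ cntA seqs mg c) := by
  intro rest
  induction rest with
  | nil => intro res _ _ _; simp [altInner]
  | cons b rest ih =>
    intro res hne hfresh hnd
    have hab : a ≠ b := hne b List.mem_cons_self
    have hcnt : altCount seqs a b mg = cntA seqs mg (canon a b) := cnt_eq seqs a b mg hab
    show altInner seqs ms mg a rest
        (if ms ≤ altCount seqs a b mg then
          PySem.Set.add res (if a ≤ b then [a, b] else [b, a]) else res)
      = _
    have hcan : (if a ≤ b then [a, b] else [b, a]) = canon a b := rfl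
    rw [hcan, hcnt]
    simp only [List.map_cons, List.filter_cons]
    by_cases hp : ms ≤ cntA seqs mg (canon a b)
    · rw [if_pos hp, PySem.Set.add_of_not_mem (hfresh b List.mem_cons_self)]
      rw [ih (res ++ [canon a b])
        (fun t ht => hne t (List.mem_cons_of_mem _ ht))
        (fun t ht hmem => by
          rcases List.mem_append.mp hmem with h | h
          · exact hfresh t (List.mem_cons_of_mem _ ht) h
          · have he : canon a t = canon a b := List.mem_singleton.mp h
            have : t = b := canon_inj_right he
            subst this
            exact (List.nodup_cons.mp (by simpa using hnd)).1 (List.mem_map_of_mem ht))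
        ((List.nodup_cons.mp (by simpa using hnd)).2)]
      simp [hp]
    · rw [if_neg hp]
      rw [ih res (fun t ht => hne t (List.mem_cons_of_mem _ ht))
        (fun t ht => hfresh t (List.mem_cons_of_mem _ ht))
        ((List.nodup_cons.mp (by simpa using hnd)).2)]
      simp [hp]

theorem altOuter_spec (seqs : List (List Int)) (ms mg : Int) :
    ∀ (todo done : List Int), (done ++ todo).Nodup →
    altOuter seqs ms mg todo
        ((triPre done todo).filter (fun c => ms ≤ cntA seqs mg c))
      = (tri (done ++ todo)).filter (fun c => ms ≤ cntA seqs mg c) := by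
  intro todo
  induction todo with
  | nil =>
    intro done _
    simp [altOuter, triPre_nil]
  | cons a rest ih =>
    intro done hnd
    have hnds : (a :: rest).Nodup := (List.nodup_append.mp hnd).2.1
    show altOuter seqs ms mg rest
        (altInner seqs ms mg a rest
          ((triPre done (a :: rest)).filter (fun c => ms ≤ cntA seqs mg c)))
      = _
    rw [altInner_spec seqs ms mg a rest _
      (fun t ht he => (List.nodup_cons.mp hnds).1 (he ▸ ht))
      (fun t ht hmem => fresh_triPre hnd ht (List.mem_of_mem_filter hmem))
      (nodup_map_canon (List.nodup_cons.mp hnds).2)]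
    rw [← List.filter_append, ← triPre_snoc]
    have hassoc : done ++ a :: rest = (done ++ [a]) ++ rest := by simp
    rw [hassoc]
    exact ih (done ++ [a]) (by rw [← hassoc]; exact hnd)

theorem box_fold (l : List Int) :
    ∀ s : List Int,
    l.foldl (fun acc x => PySem.Set.add acc [x]) (s.map (fun x => [x]))
      = (l.foldl PySem.Set.add s).map (fun x => [x]) := by
  induction l with
  | nil => intro s; rfl
  | cons x t ih =>
    intro s
    rw [List.foldl_cons, List.foldl_cons]
    have hstep : PySem.Set.add (s.map (fun x => [x])) [x]
        = (PySem.Set.add s x).map (fun x => [x]) := by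
      by_cases hm : x ∈ s
      · rw [PySem.Set.add_of_mem (List.mem_map_of_mem hm), PySem.Set.add_of_mem hm]
      · rw [PySem.Set.add_of_not_mem (fun hmem => by
            obtain ⟨y, hy, he⟩ := List.mem_map.mp hmem
            have : y = x := by simpa using he
            exact hm (this ▸ hy)),
          PySem.Set.add_of_not_mem hm]
        simp
    rw [hstep, ih (PySem.Set.add s x)]

theorem singles_eq (sequences : List (List Int)) :
    sequences.foldl (fun acc sq =>
        sq.foldl (fun acc item => PySem.Set.add acc [item]) acc) []
      = (PySem.List.dedup (sequences.flatMap (fun sq => sq))).map (fun x => [x]) := by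
  have main : ∀ (ss : List (List Int)) (s : List Int),
      ss.foldl (fun acc sq => sq.foldl (fun acc item => PySem.Set.add acc [item]) acc)
          (s.map (fun x => [x]))
        = ((ss.flatMap (fun sq => sq)).foldl PySem.Set.add s).map (fun x => [x]) := by
    intro ss
    induction ss with
    | nil => intro s; simp
    | cons sq rest ih =>
      intro s
      rw [List.foldl_cons, box_fold sq s, ih (sq.foldl PySem.Set.add s),
        List.flatMap_cons, List.foldl_append]
  have h0 := main sequences []
  simpa [PySem.List.dedup_eq_ofList, PySem.Set.ofList_eq_foldl] using h0

theorem MGen_two (freq : List (List Int)) (h2 : ∀ c ∈ freq, c.length = 2) :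
    pyA_MGen freq 2 = [] := by
  unfold pyA_MGen
  refine foldl_id_of _ _ _ (fun sqe hsq => ?_)
  dsimp only
  have hinner : freq.foldl (fun cands ad =>
      if (ad.length : Int) = 1 then
        let nc := pyFsUnion sqe ad
        if (nc.length : Int) = 2 + 1 then PySem.Set.add cands nc else cands
      else cands) [] = [] := by
    refine foldl_id_of _ _ _ (fun ad had => ?_)
    dsimp only
    rw [if_neg (by rw [h2 ad had]; norm_num)]
  split
  · exact hinner
  · rfl

theorem countSupport_nil (seqs : List (List Int)) (mg : Int) :
    (pyA_countSupport seqs [] mg).items = [] := by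
  unfold pyA_countSupport
  rw [List.foldl_nil, foldl_id_of _ _ _ (fun sq _ => by rw [List.foldl_nil])]
  rfl

theorem gsp_main (sequences : List (List Int)) (min_support max_gap max_length : Int) :
    gsp_algorithm_with_MGen sequences min_support max_gap max_length =
      gsp_algorithm_with_MGen_alt sequences min_support max_gap max_length := by
  unfold gsp_algorithm_with_MGen gsp_algorithm_with_MGen_alt
  dsimp only
  set items := PySem.List.dedup (sequences.flatMap (fun sq => sq)) with hitems
  have hnd : items.Nodup := PySem.List.nodup_dedup _
  by_cases hml : max_length < 1
  · rw [if_pos hml]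
    have h0 : max_length.toNat = 0 := by omega
    rw [h0]
    rfl
  · rw [if_neg hml]
    obtain ⟨n, hn⟩ : ∃ n, max_length.toNat = n + 1 := ⟨max_length.toNat - 1, by omega⟩
    rw [hn, singles_eq sequences]
    set P := (tri items).filter (fun c => min_support ≤ cntA sequences max_gap c) with hP
    have hB : altOuter sequences min_support max_gap items []
        = P := by
      have := altOuter_spec sequences min_support max_gap items [] (by simpa using hnd)
      simpa [triPre] using this
    rw [hB]
    show pyA_loop sequences min_support max_gap (n + 1) 1 [] (items.map (fun x => [x])) = P
    have hPnd : P.Nodup := (tri_nodup hnd).filter _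
    have hcur : ((pyA_countSupport sequences (pyA_MGen (items.map (fun x => [x])) (1 + 1 - 1))
          max_gap).items.filter (fun p => min_support ≤ p.2)).map (fun p => p.1) = P := by
      rw [show (1 : Int) + 1 - 1 = 1 by norm_num, MGen_one hnd]
      exact countSupport_curFreq sequences (tri items) min_support max_gap (tri_nodup hnd)
    rw [pyA_loop]
    rw [hcur]
    by_cases hPe : P = []
    · rw [hPe]
      rfl
    · rw [if_neg (by simpa [List.isEmpty_iff] using hPe)]
      have hupd : PySem.Set.update [] P = P := by
        rw [PySem.Set.update_nil_left]
        exact PySem.Set.ofList_eq_self_of_nodup _ hPnd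
      rw [hupd]
      cases n with
      | zero => rfl
      | succ m =>
        rw [pyA_loop]
        have h2 : ∀ c ∈ P, c.length = 2 := fun c hc =>
          length_of_mem_tri (List.mem_of_mem_filter hc)
        rw [show (1 : Int) + 1 + 1 - 1 = 2 by norm_num, MGen_two P h2, countSupport_nil]
        rfl

-- ===== VERDICT (by name: the statement is the Claim_ definition above) =====
theorem gsp_algorithm_with_MGen_spec : Claim_equal_gsp_algorithm_with_MGen := by
  intro sequences ms mg ml _
  exact gsp_main sequences ms mg ml

-- the support count of a candidate, and the shared pass predicate
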